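-- pv_equiv track=rewrite | github.com/passaAGI/PythonLabMate20172018 | Lab05/Es4.py | leastCoprime
-- ===== SOURCE A (Python) =====
-- def leastCoprime(n):
--     c = []
--     if n > 2:
--         for i in range(2, n):
--            if(gcd(n,i)==1):
--                c.append(i)
--                break
--         return(min(c))
--
-- def gcd(n, m):
--     d_n = []
--     d_m = []
--     d_nm = []
--     for i in range(1, n+1):
--         if n%i == 0:
--             d_n.append(i)
--     for j in range(1, m+1):
--         if m%j == 0:
--             d_m.append(j)
--     for i in d_n:
--         if i in d_m:
--             d_nm.append(i)
--     return(max(d_nm))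
-- ===== SOURCE B (Python) =====
-- def leastCoprime(n):
--     # Factor n once into its distinct prime factors (trial division with
--     # divide-out, O(sqrt n)), then return the first i in [2, n) divisible by
--     # none of them; None for n <= 2, as in the original.
--     if n <= 2:
--         return None
--     ps = []
--     m = n
--     p = 2
--     while p * p <= m:
--         if m % p == 0:
--             ps.append(p)
--             while m % p == 0:
--                 m //= p
--         p += 1
--     if m > 1:
--         ps.append(m)
--     return next((i for i in range(2, n) if all(i % p != 0 for p in ps)), None)
-- ===== Notes on version B (the rewrite author's own statement) =====
-- stated objective: faster
-- what changed: Instead of testing each candidate with an O(n) divisor-enumeration gcd, B factorizes n once by divide-out trial division (O(sqrt n)) and tests candidates by divisibility against the small set of distinct prime factors.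
import Mathlib
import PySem

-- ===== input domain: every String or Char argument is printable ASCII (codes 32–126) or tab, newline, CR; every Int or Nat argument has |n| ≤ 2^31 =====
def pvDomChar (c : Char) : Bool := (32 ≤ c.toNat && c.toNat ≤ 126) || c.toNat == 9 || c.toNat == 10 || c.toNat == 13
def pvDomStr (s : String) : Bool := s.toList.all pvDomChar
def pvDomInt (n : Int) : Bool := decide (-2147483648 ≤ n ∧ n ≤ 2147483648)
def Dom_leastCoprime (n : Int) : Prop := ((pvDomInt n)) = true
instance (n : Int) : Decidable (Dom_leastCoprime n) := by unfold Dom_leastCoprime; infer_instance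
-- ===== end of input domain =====

-- B replaces A's per-candidate O(n) divisor-enumeration gcd by one O(√n) prime
-- factorisation of n plus divisibility tests against the distinct prime factors.

-- ===== PORT A =====
-- helper gcd(n, m): collect divisors of n, divisors of m, their common list, take max.
-- max([]) would raise in Python; the port returns none there (unreachable on A's call sites).
def pvGcdA (n m : Int) : Option Int :=
  let d_n := (PySem.List.pyRange 1 (n + 1) 1).filter (fun i => PySem.Int.mod n i == 0)
  let d_m := (PySem.List.pyRange 1 (m + 1) 1).filter (fun j => PySem.Int.mod m j == 0)
  let d_nm := d_n.filter (fun i => d_m.contains i)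
  PySem.List.max? d_nm (fun x => x)

-- the for-loop with break: c stays [] until the first hit, then [i] and break.
def pvALoop (n : Int) : List Int → List Int
  | [] => []
  | i :: rest => if pvGcdA n i == some 1 then [i] else pvALoop n rest

def leastCoprime (n : Int) : Option Int :=
  if 2 < n then PySem.List.min? (pvALoop n (PySem.List.pyRange 2 n 1)) (fun x => x)
  else none

-- ===== PORT B =====
-- inner `while m % p == 0: m //= p` (guards 2 ≤ p, 0 < m only make it total; always true at call sites)
def pvStrip (m p : Nat) : Nat :=
  if h : 2 ≤ p ∧ 0 < m ∧ m % p = 0 then pvStrip (m / p) p else m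
termination_by m
decreasing_by exact Nat.div_lt_self h.2.1 (by omega)

theorem pvStrip_le (m p : Nat) : pvStrip m p ≤ m := by
  induction m using Nat.strong_induction_on with
  | _ m ih =>
    rw [pvStrip]
    split
    · rename_i h
      exact le_of_lt (lt_of_le_of_lt (ih _ (Nat.div_lt_self h.2.1 (by omega))) (Nat.div_lt_self h.2.1 (by omega)))
    · exact le_refl m

-- outer `while p * p <= m:` plus the trailing `if m > 1: ps.append(m)`
-- (guard 2 ≤ p only makes it total; always true at call sites)
def pvFacLoop (ps : List Nat) (m p : Nat) : List Nat :=
  if h : 2 ≤ p ∧ p * p ≤ m then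
    if m % p = 0 then pvFacLoop (ps ++ [p]) (pvStrip m p) (p + 1)
    else pvFacLoop ps m (p + 1)
  else if 1 < m then ps ++ [m] else ps
termination_by m + 1 - p
decreasing_by
  · have h2 : 2 * p ≤ p * p := Nat.mul_le_mul_right p h.1
    have := pvStrip_le m p; omega
  · have h2 : 2 * p ≤ p * p := Nat.mul_le_mul_right p h.1
    omega

def leastCoprime_alt (n : Int) : Option Int :=
  if n ≤ 2 then none
  else
    let ps := pvFacLoop [] n.toNat 2
    ((List.range' 2 (n.toNat - 2)).find? (fun i => ps.all (fun p => i % p != 0))).map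
      (fun i => Int.ofNat i)

-- ===== PRECONDITION & SPEC =====
def Spec_leastCoprime (n : Int) (out : Option Int) : Prop := out = leastCoprime_alt n
instance (n : Int) (out : Option Int) : Decidable (Spec_leastCoprime n out) := by unfold Spec_leastCoprime; infer_instance

-- ===== CLAIM (what is proved, stated in full; the proofs are below) =====
def Claim_equal_leastCoprime : Prop := ∀ (n : Int), Dom_leastCoprime n → Spec_leastCoprime n (leastCoprime n)

-- ===== LEMMAS AND PROOFS =====

-- A's hand-rolled gcd equals Nat.gcd on positive arguments
theorem pvGcdA_eq (N I : Nat) (hN : 1 ≤ N) (hI : 1 ≤ I) :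
    pvGcdA (N : Int) (I : Int) = some ((Nat.gcd N I : Nat) : Int) := by
  unfold pvGcdA
  set g : Int := ((Nat.gcd N I : Nat) : Int) with hgdef
  have hg1 : 1 ≤ g := by
    have := Nat.gcd_pos_of_pos_left I (show 0 < N by omega)
    omega
  have hdn : ∀ (M : Nat) (x : Int), 1 ≤ M →
      (x ∈ (PySem.List.pyRange 1 ((M : Int) + 1) 1).filter (fun i => PySem.Int.mod (M : Int) i == 0)
        ↔ (1 ≤ x ∧ x ≤ (M : Int) ∧ x ∣ (M : Int))) := by
    intro M x _
    rw [List.mem_filter, PySem.List.mem_pyRange_one]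
    constructor
    · rintro ⟨⟨h1, h2⟩, h3⟩
      refine ⟨h1, by omega, ?_⟩
      have := (PySem.Int.mod_eq_zero_iff_dvd (M : Int) x).mp (by simpa using h3)
      exact this
    · rintro ⟨h1, h2, h3⟩
      refine ⟨⟨h1, by omega⟩, ?_⟩
      simpa using (PySem.Int.mod_eq_zero_iff_dvd (M : Int) x).mpr h3
  have hgN : g ∣ (N : Int) := Int.natCast_dvd_natCast.mpr (Nat.gcd_dvd_left N I)
  have hgI : g ∣ (I : Int) := Int.natCast_dvd_natCast.mpr (Nat.gcd_dvd_right N I)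
  have hgmem : g ∈ (PySem.List.pyRange 1 ((N : Int) + 1) 1).filter
        (fun i => PySem.Int.mod (N : Int) i == 0) :=
    (hdn N g hN).mpr ⟨hg1, Int.le_of_dvd (by omega) hgN, hgN⟩
  have hgmemI : g ∈ (PySem.List.pyRange 1 ((I : Int) + 1) 1).filter
        (fun j => PySem.Int.mod (I : Int) j == 0) :=
    (hdn I g hI).mpr ⟨hg1, Int.le_of_dvd (by omega) hgI, hgI⟩
  have hgnm : g ∈ ((PySem.List.pyRange 1 ((N : Int) + 1) 1).filter
        (fun i => PySem.Int.mod (N : Int) i == 0)).filter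
        (fun i => ((PySem.List.pyRange 1 ((I : Int) + 1) 1).filter
          (fun j => PySem.Int.mod (I : Int) j == 0)).contains i) := by
    rw [List.mem_filter]
    exact ⟨hgmem, by simpa [List.elem_iff] using hgmemI⟩
  cases hmax : PySem.List.max? (((PySem.List.pyRange 1 ((N : Int) + 1) 1).filter
      (fun i => PySem.Int.mod (N : Int) i == 0)).filter
      (fun i => ((PySem.List.pyRange 1 ((I : Int) + 1) 1).filter
        (fun j => PySem.Int.mod (I : Int) j == 0)).contains i)) (fun x => x) with
  | none =>
    rw [PySem.List.max?_eq_none_iff] at hmax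
    rw [hmax] at hgnm
    cases hgnm
  | some v =>
    have hvmem := PySem.List.max?_mem hmax
    have hvmax := PySem.List.max?_isMax hmax g hgnm
    rw [List.mem_filter] at hvmem
    obtain ⟨hv1, hv2⟩ := hvmem
    have hvN := (hdn N v hN).mp hv1
    have hvI : v ∣ (I : Int) := by
      have : v ∈ (PySem.List.pyRange 1 ((I : Int) + 1) 1).filter
          (fun j => PySem.Int.mod (I : Int) j == 0) := by
        simpa [List.elem_iff] using hv2
      exact ((hdn I v hI).mp this).2.2
    have hvg : v ∣ g := by
      obtain ⟨vn, rfl⟩ : ∃ k : ℕ, v = (k : Int) := ⟨v.toNat, by omega⟩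
      rw [hgdef, Int.natCast_dvd_natCast]
      exact Nat.dvd_gcd (Int.natCast_dvd_natCast.mp hvN.2.2) (Int.natCast_dvd_natCast.mp hvI)
    have : v ≤ g := Int.le_of_dvd (by omega) hvg
    have : v = g := le_antisymm this hvmax
    rw [this]

-- pvStrip: a divisor of m that drops the (prime) factor p and keeps all other prime factors
theorem pvStrip_spec (p : Nat) (hpp : Nat.Prime p) : ∀ m, 1 ≤ m →
    ¬ p ∣ pvStrip m p ∧ 1 ≤ pvStrip m p ∧ pvStrip m p ∣ m ∧
    ∀ q, Nat.Prime q → q ≠ p → (q ∣ pvStrip m p ↔ q ∣ m) := by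
  have hp : 2 ≤ p := hpp.two_le
  intro m
  induction m using Nat.strong_induction_on with
  | _ m ih =>
    intro hm
    rw [pvStrip]
    by_cases hd : m % p = 0
    · have hdvd : p ∣ m := Nat.dvd_of_mod_eq_zero hd
      rw [dif_pos ⟨hp, by omega, hd⟩]
      have hq1 : 1 ≤ m / p := (Nat.one_le_div_iff (by omega)).mpr (Nat.le_of_dvd (by omega) hdvd)
      have hlt : m / p < m := Nat.div_lt_self (by omega) (by omega)
      obtain ⟨h1, h2, h3, h4⟩ := ih (m / p) hlt hq1
      have hmm : m = p * (m / p) := (Nat.mul_div_cancel' hdvd).symm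
      refine ⟨h1, h2, h3.trans (Nat.div_dvd_of_dvd hdvd), ?_⟩
      intro q hq hqp
      rw [h4 q hq hqp]
      constructor
      · intro h; exact h.trans (Nat.div_dvd_of_dvd hdvd)
      · intro h
        rcases (Nat.Prime.dvd_mul hq).mp (hmm ▸ h) with h' | h'
        · exact absurd ((Nat.prime_dvd_prime_iff_eq hq hpp).mp h') hqp
        · exact h'
    · rw [dif_neg (by intro h; exact hd h.2.2)]
      exact ⟨fun h => hd (Nat.dvd_iff_mod_eq_zero.mp h), hm, dvd_refl m,
        fun q _ _ => Iff.rfl⟩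

-- pvFacLoop collects exactly the prime factors of m (given the no-small-factor invariant)
theorem pvFacLoop_mem : ∀ (ps : List Nat) (m p : Nat), 2 ≤ p → 1 ≤ m →
    (∀ d, 2 ≤ d → d < p → ¬ d ∣ m) →
    ∀ q, (q ∈ pvFacLoop ps m p ↔ q ∈ ps ∨ (Nat.Prime q ∧ q ∣ m)) := by
  intro ps m p
  induction ps, m, p using pvFacLoop.induct with
  | case1 ps m p h hd ih =>
    intro hp hm hsm q
    -- p divides m, and m has no divisor in [2, p): p is prime
    have hpd : p ∣ m := Nat.dvd_of_mod_eq_zero hd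
    have hpp : Nat.Prime p := by
      rw [Nat.prime_def_lt]
      refine ⟨hp, fun d hdlt hddvd => ?_⟩
      by_contra hne
      have hd0 : d ≠ 0 := by
        rintro rfl
        exact absurd (Nat.eq_zero_of_zero_dvd hddvd) (by omega)
      exact hsm d (by omega) hdlt (hddvd.trans hpd)
    obtain ⟨h1, h2, h3, h4⟩ := pvStrip_spec p hpp m (by omega)
    have hsm' : ∀ d, 2 ≤ d → d < p + 1 → ¬ d ∣ pvStrip m p := by
      intro d h2d hdlt hddvd
      rcases Nat.lt_succ_iff_lt_or_eq.mp hdlt with h' | rfl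
      · exact hsm d h2d h' (hddvd.trans h3)
      · exact h1 hddvd
    rw [pvFacLoop, dif_pos h, if_pos hd]
    rw [ih (by omega) h2 hsm' q, List.mem_append, List.mem_singleton]
    constructor
    · rintro ((hq | rfl) | ⟨hq, hqd⟩)
      · exact Or.inl hq
      · exact Or.inr ⟨hpp, hpd⟩
      · exact Or.inr ⟨hq, hqd.trans h3⟩
    · rintro (hq | ⟨hq, hqd⟩)
      · exact Or.inl (Or.inl hq)
      · by_cases hqp : q = p
        · subst hqp; exact Or.inl (Or.inr rfl)
        · exact Or.inr ⟨hq, (h4 q hq hqp).mpr hqd⟩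
  | case2 ps m p h hd ih =>
    intro hp hm hsm q
    have hnd : ¬ p ∣ m := fun hpd => hd (Nat.dvd_iff_mod_eq_zero.mp hpd)
    have hsm' : ∀ d, 2 ≤ d → d < p + 1 → ¬ d ∣ m := by
      intro d h2d hdlt
      rcases Nat.lt_succ_iff_lt_or_eq.mp hdlt with h' | rfl
      · exact hsm d h2d h'
      · exact hnd
    rw [pvFacLoop, dif_pos h, if_neg hd]
    exact ih (by omega) hm hsm' q
  | case3 ps m p h h1 =>
    intro hp hm hsm q
    rw [pvFacLoop, dif_neg h]
    have hpm : m < p * p := by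
      rcases Nat.lt_or_ge m (p * p) with h' | h'
      · exact h'
      · exact absurd ⟨hp, h'⟩ h
    · have hmp : Nat.Prime m := by
        rw [Nat.prime_def_lt]
        refine ⟨h1, fun d hdlt hddvd => ?_⟩
        by_contra hne
        have hd0 : d ≠ 0 := by
          rintro rfl
          exact absurd (Nat.eq_zero_of_zero_dvd hddvd) (by omega)
        have hdp : p ≤ d := le_of_not_gt (fun hlt => hsm d (by omega) hlt hddvd)
        obtain ⟨e, he⟩ := hddvd
        have he0 : e ≠ 0 := by rintro rfl; omega
        have he1 : e ≠ 1 := by rintro rfl; omega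
        have hep : p ≤ e :=
          le_of_not_gt (fun hlt => hsm e (by omega) hlt ⟨d, by rw [he]; ring⟩)
        nlinarith
      rw [if_pos h1, List.mem_append, List.mem_singleton]
      constructor
      · rintro (hq | rfl)
        · exact Or.inl hq
        · exact Or.inr ⟨hmp, dvd_refl _⟩
      · rintro (hq | ⟨hq, hqd⟩)
        · exact Or.inl hq
        · exact Or.inr ((Nat.prime_dvd_prime_iff_eq hq hmp).mp hqd)
  | case4 ps m p h h1 =>
    intro hp hm hsm q
    rw [pvFacLoop, dif_neg h, if_neg h1]
    have hm1 : m = 1 := by omega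
    subst hm1
    constructor
    · exact Or.inl
    · rintro (hq | ⟨hq, hqd⟩)
      · exact hq
      · exact absurd (Nat.dvd_one.mp hqd ▸ hq) Nat.not_prime_one

-- the two coprimality tests agree
theorem pvCond_iff (N I : Nat) (hN : 2 ≤ N) (hI : 1 ≤ I) :
    (Nat.gcd N I = 1 ↔ ((pvFacLoop [] N 2).all (fun p => I % p != 0) = true)) := by
  have hmem := pvFacLoop_mem [] N 2 (le_refl 2) (by omega) (fun d h2 hlt _ => by omega)
  rw [List.all_eq_true]
  constructor
  · intro hg x hx
    rcases (hmem x).mp hx with h | ⟨hxp, hxN⟩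
    · simp at h
    · have hnd : ¬ x ∣ I := by
        intro hxi
        have hdv : x ∣ Nat.gcd N I := Nat.dvd_gcd hxN hxi
        rw [hg, Nat.dvd_one] at hdv
        exact Nat.not_prime_one (hdv ▸ hxp)
      simpa [bne_iff_ne, ← Nat.dvd_iff_mod_eq_zero] using hnd
  · intro hall
    by_contra hg
    obtain ⟨q, hqp, hqd⟩ := Nat.exists_prime_and_dvd hg
    have hqN : q ∣ N := hqd.trans (Nat.gcd_dvd_left N I)
    have hqI : q ∣ I := hqd.trans (Nat.gcd_dvd_right N I)
    have := hall q ((hmem q).mpr (Or.inr ⟨hqp, hqN⟩))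
    rw [bne_iff_ne] at this
    exact this (Nat.dvd_iff_mod_eq_zero.mp hqI)

-- the break-loop + min([x]) equals find? over the corresponding Nat range
theorem pvLoop_eq (n : Int) (l : List Nat) (q : Nat → Bool)
    (hpt : ∀ i ∈ l, ((pvGcdA n ((i : Nat) : Int) == some 1) = q i)) :
    PySem.List.min? (pvALoop n (l.map (fun k => Int.ofNat k))) (fun x => x)
      = (l.find? q).map (fun i => Int.ofNat i) := by
  induction l with
  | nil => simp [pvALoop, PySem.List.min?]
  | cons i t ih =>
    have h := hpt i (by simp)
    rw [List.map_cons,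
      show pvALoop n (Int.ofNat i :: t.map (fun k => Int.ofNat k))
          = if pvGcdA n (Int.ofNat i) == some 1 then [Int.ofNat i]
            else pvALoop n (t.map (fun k => Int.ofNat k)) from rfl,
      show pvGcdA n (Int.ofNat i) = pvGcdA n (i : Int) from rfl, h]
    cases hq : q i with
    | true =>
      rw [List.find?_cons_of_pos hq]
      simp [PySem.List.min?_id_cons]
    | false =>
      rw [List.find?_cons_of_neg (by simp [hq])]
      simp only [Bool.false_eq_true, if_false]
      exact ih (fun j hj => hpt j (by simp [hj]))

-- ===== VERDICT (by name: the statement is the Claim_ definition above) =====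
theorem leastCoprime_spec : Claim_equal_leastCoprime := by
  intro n _
  unfold Spec_leastCoprime leastCoprime leastCoprime_alt
  by_cases h : 2 < n
  · have hn2 : ¬ n ≤ 2 := by omega
    simp only [if_pos h, if_neg hn2]
    set N := n.toNat with hN
    have hNn : (N : Int) = n := by omega
    have hN3 : 3 ≤ N := by omega
    have hrange : PySem.List.pyRange 2 n 1 = (List.range' 2 (N - 2)).map (fun k => Int.ofNat k) := by
      rw [PySem.List.pyRange_one, List.range'_eq_map_range]
      rw [List.map_map]
      have : (n - 2).toNat = N - 2 := by omega
      rw [this]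
      apply List.map_congr_left
      intro k _
      simp
    rw [hrange]
    rw [pvLoop_eq n _ (fun i => (pvFacLoop [] N 2).all (fun p => i % p != 0))]
    intro i hi
    have hmem := List.mem_range'.mp hi
    have hi2 : 2 ≤ i := by omega
    have hiN : i < N := by omega
    rw [← hNn, pvGcdA_eq N i (by omega) (by omega)]
    have := pvCond_iff N i (by omega) (by omega)
    cases hq : (pvFacLoop [] N 2).all (fun p => i % p != 0) with
    | true =>
      have : Nat.gcd N i = 1 := this.mpr hq
      simp [this]
    | false =>
      have hne : Nat.gcd N i ≠ 1 := fun hg => by rw [this.mp hg] at hq; cases hq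
      simpa using fun hc => hne (by exact_mod_cast hc)
  · have hn2 : n ≤ 2 := by omega
    simp [if_neg h, if_pos hn2]
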